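-- pv_equiv track=rewrite | github.com/zacowan/aoc | Solutions/2022/06/solution.py | part1
-- ===== SOURCE A (Python) =====
-- from collections import deque
--
-- def part1(data: str):
--     """Solve part 1."""
--     characters = deque()
--     result = -1
--     for i, c in enumerate(data):
--         # Add characters to queue
--         characters.append(c)
--         # Check if there are 4 unique characters
--         if i >= 3:
--             if len(set(characters)) == 4:
--                 result = i + 1
--                 break
--             else:
--                 characters.popleft()
--     return result
-- ===== SOURCE B (Python) =====
-- def part1(data: str):
--     """Solve part 1."""
--     start = 0
--     last_seen = {}
--     for i, c in enumerate(data):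
--         if c in last_seen and last_seen[c] >= start:
--             start = last_seen[c] + 1
--         last_seen[c] = i
--         if i - start + 1 == 4:
--             return i + 1
--     return -1
-- ===== Notes on version B (the rewrite author's own statement) =====
-- stated objective: alternative
-- what changed: Replaces the deque of the last four characters and the set rebuilt at every position with a last-seen-index sliding window: a left pointer advanced past the previous occurrence of each character plus a dict of last indices, returning when the distinct window reaches length 4.
import Mathlib
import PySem

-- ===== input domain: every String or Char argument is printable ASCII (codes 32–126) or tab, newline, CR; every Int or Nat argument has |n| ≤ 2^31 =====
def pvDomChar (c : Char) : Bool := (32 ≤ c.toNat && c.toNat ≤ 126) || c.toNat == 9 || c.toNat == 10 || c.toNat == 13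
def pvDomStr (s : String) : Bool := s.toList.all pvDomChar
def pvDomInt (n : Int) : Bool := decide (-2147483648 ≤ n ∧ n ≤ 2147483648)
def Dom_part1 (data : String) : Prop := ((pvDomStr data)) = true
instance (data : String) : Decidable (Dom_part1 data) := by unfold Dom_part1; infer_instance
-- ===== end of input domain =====

-- B replaces A's deque of the last four characters (with a set rebuilt at every position)
-- by a last-seen-index sliding window: a left pointer and a dict of last occurrence indices.

-- ===== PORT A =====
-- the for-loop with `break` returns i + 1 directly; `result = -1` is the fall-through value
def part1Go : List Char → Int → List Char → Int
  | [], _, _ => -1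
  | c :: rest, i, characters =>
    let characters := characters ++ [c]
    if i ≥ 3 then
      if PySem.Set.len (PySem.Set.ofList characters) = 4 then i + 1
      else part1Go rest (i + 1) characters.tail
    else part1Go rest (i + 1) characters

def part1 (data : String) : Int := part1Go data.toList 0 []

-- ===== PORT B =====
def part1AltGo : List Char → Int → Int → PySem.Dict Char Int → Int
  | [], _, _, _ => -1
  | c :: rest, i, start, lastSeen =>
    let start := if lastSeen.contains c && decide (lastSeen.getD c 0 ≥ start) then
        lastSeen.getD c 0 + 1
      else start
    let lastSeen := lastSeen.insert c i
    if i - start + 1 = 4 then i + 1 else part1AltGo rest (i + 1) start lastSeen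

def part1_alt (data : String) : Int := part1AltGo data.toList 0 0 PySem.Dict.empty

-- ===== PRECONDITION & SPEC =====
def Spec_part1 (data : String) (out : Int) : Prop := out = part1_alt data
instance (data : String) (out : Int) : Decidable (Spec_part1 data out) := by unfold Spec_part1; infer_instance

-- ===== CLAIM (what is proved, stated in full; the proofs are below) =====
def Claim_equal_part1 : Prop := ∀ (data : String), Dom_part1 data → Spec_part1 data (part1 data)

-- ===== LEMMAS AND PROOFS =====

/-- last index of `c` in `p`, if any -/
def lastIdx? : List Char → Char → Option Nat
  | [], _ => none
  | a :: l, c =>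
    match lastIdx? l c with
    | some j => some (j + 1)
    | none => if a = c then some 0 else none

lemma lastIdx?_append (p : List Char) (c' c : Char) :
    lastIdx? (p ++ [c']) c = if c' = c then some p.length else lastIdx? p c := by
  induction p with
  | nil => simp [lastIdx?]
  | cons a l ih =>
    by_cases h : c' = c
    · subst h; simp [lastIdx?, ih]
    · simp [lastIdx?, ih, h]

lemma lastIdx?_none {p : List Char} {c : Char} : lastIdx? p c = none ↔ c ∉ p := by
  induction p with
  | nil => simp [lastIdx?]
  | cons a l ih =>
    simp only [lastIdx?]
    cases h : lastIdx? l c with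
    | some j =>
      have hcl : c ∈ l := by
        by_contra hc
        simp [ih.mpr hc] at h
      simp [hcl]
    | none =>
      have hcl : c ∉ l := ih.mp h
      by_cases hac : a = c
      · subst hac; simp
      · simp only [hac, if_false]
        simp only [true_iff, List.mem_cons, not_or]
        exact ⟨fun h' => hac h'.symm, hcl⟩

lemma drop_le_mem {p : List Char} {c : Char} {s t : Nat} (h : s ≤ t) :
    c ∈ p.drop t → c ∈ p.drop s := by
  intro hm
  have : p.drop t = (p.drop s).drop (t - s) := by
    rw [List.drop_drop]; congr 1; omega
  rw [this] at hm
  exact (List.drop_subset _ _) hm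

lemma nodup_drop_mono {p : List Char} {s t : Nat} (h : s ≤ t) :
    (p.drop s).Nodup → (p.drop t).Nodup := by
  intro hn
  have : p.drop t = (p.drop s).drop (t - s) := by
    rw [List.drop_drop]; congr 1; omega
  rw [this]
  exact hn.sublist (List.drop_sublist _ _)

lemma lastIdx?_some {p : List Char} {c : Char} {j : Nat} (h : lastIdx? p c = some j) :
    j < p.length ∧ c ∈ p.drop j ∧ c ∉ p.drop (j + 1) := by
  induction p generalizing j with
  | nil => simp [lastIdx?] at h
  | cons a l ih =>
    simp only [lastIdx?] at h
    cases hl : lastIdx? l c with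
    | some j' =>
      rw [hl] at h
      obtain ⟨h1, h2, h3⟩ := ih hl
      cases h
      refine ⟨by simpa using Nat.succ_lt_succ h1, ?_, ?_⟩
      · simpa using h2
      · simpa using h3
    | none =>
      rw [hl] at h
      by_cases hac : a = c
      · simp [hac] at h
        subst hac
        cases h
        exact ⟨by simp, by simp, by simpa using lastIdx?_none.mp hl⟩
      · simp [hac] at h

lemma nodup_append_singleton (l : List Char) (c : Char) :
    (l ++ [c]).Nodup ↔ l.Nodup ∧ c ∉ l := by
  constructor
  · intro h
    exact ⟨h.sublist (List.sublist_append_left _ _), by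
      intro hm
      exact (List.disjoint_of_nodup_append h) hm (by simp)⟩
  · intro ⟨h1, h2⟩
    exact h1.append (by simp) (by simpa [List.disjoint_singleton] using h2)

lemma setLen_four {l : List Char} (hl : l.length = 4) :
    PySem.Set.len (PySem.Set.ofList l) = 4 ↔ l.Nodup := by
  have hfin : (PySem.Set.ofList l).toFinset = l.toFinset := by
    ext x
    simp [List.mem_toFinset, PySem.Set.mem_ofList]
  have hlen : (PySem.Set.ofList l : List Char).length = l.dedup.length := by
    rw [← List.toFinset_card_of_nodup (PySem.Set.nodup_ofList l), hfin, List.card_toFinset]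
  constructor
  · intro h
    have h4 : (PySem.Set.ofList l : List Char).length = 4 := by
      have := h
      simp only [PySem.Set.len] at this
      exact_mod_cast this
    have : l.dedup.length = l.length := by omega
    have : l.dedup = l := (List.dedup_sublist l).eq_of_length this
    exact List.dedup_eq_self.mp this
  · intro h
    have : l.dedup = l := List.dedup_eq_self.mpr h
    simp [PySem.Set.len, hlen, this, hl]

lemma nodup_drop_append {p : List Char} {c : Char} {s : Nat} (hs : s ≤ p.length)
    (hnd : (p.drop s).Nodup) (hc : c ∉ p.drop s) : ((p ++ [c]).drop s).Nodup := by
  rw [List.drop_append_of_le_length hs, nodup_append_singleton]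
  exact ⟨hnd, hc⟩

lemma not_nodup_drop_append {p : List Char} {c : Char} {s : Nat} (hs : s ≤ p.length)
    (h : ¬ (p.drop s).Nodup ∨ c ∈ p.drop s) : ¬ ((p ++ [c]).drop s).Nodup := by
  rw [List.drop_append_of_le_length hs, nodup_append_singleton]
  rintro ⟨h1, h2⟩
  rcases h with h | h
  · exact h h1
  · exact h2 h

/-- one loop step, with the new left pointer `sN'` already characterised -/
lemma go_step (rest p : List Char) (c : Char) (sN sN' : Nat) (seen : PySem.Dict Char Int)
    (hge : sN ≤ sN') (hle1 : sN' ≤ p.length + 1) (hwin : p.length - sN ≤ 3)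
    (hnd' : ((p ++ [c]).drop sN').Nodup)
    (hmin' : ∀ s, s < sN' → ¬ ((p ++ [c]).drop s).Nodup)
    (ihp : ∀ (q : List Char) (tN : Nat) (d : PySem.Dict Char Int),
      tN ≤ q.length → (q.drop tN).Nodup → (∀ s, s < tN → ¬ (q.drop s).Nodup) →
      q.length - tN ≤ 3 →
      (∀ c', d.get? c' = (lastIdx? q c').map (fun j => (j : Int))) →
      part1Go rest (q.length : Int) (q.drop (q.length - 3)) =
        part1AltGo rest (q.length : Int) (tN : Int) d)
    (hseen' : ∀ c', (seen.insert c (p.length : Int)).get? c' =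
      (lastIdx? (p ++ [c]) c').map (fun j => (j : Int))) :
    (if (p.length : Int) ≥ 3 then
       if PySem.Set.len (PySem.Set.ofList (p.drop (p.length - 3) ++ [c])) = 4 then (p.length : Int) + 1
       else part1Go rest ((p.length : Int) + 1) (p.drop (p.length - 3) ++ [c]).tail
     else part1Go rest ((p.length : Int) + 1) (p.drop (p.length - 3) ++ [c]))
    = (if (p.length : Int) - (sN' : Int) + 1 = 4 then (p.length : Int) + 1
       else part1AltGo rest ((p.length : Int) + 1) (sN' : Int) (seen.insert c (p.length : Int))) := by
  have hn1 : (p ++ [c]).length = p.length + 1 := by simp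
  have hchars : p.drop (p.length - 3) ++ [c] = (p ++ [c]).drop (p.length - 3) :=
    (List.drop_append_of_le_length (by omega)).symm
  have hrec : p.length + 1 - sN' ≤ 3 →
      part1Go rest ((p.length : Int) + 1) ((p ++ [c]).drop (p.length + 1 - 3)) =
      part1AltGo rest ((p.length : Int) + 1) (sN' : Int) (seen.insert c (p.length : Int)) := by
    intro hw
    have h := ihp (p ++ [c]) sN' (seen.insert c (p.length : Int))
      (by omega) hnd' hmin' (by rw [hn1]; exact hw) hseen'
    rw [hn1] at h
    have hc1 : ((p.length + 1 : Nat) : Int) = (p.length : Int) + 1 := by push_cast; ring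
    rw [hc1] at h
    exact h
  by_cases hn3 : 3 ≤ p.length
  · have hWlen : ((p ++ [c]).drop (p.length - 3)).length = 4 := by
      rw [List.length_drop, hn1]; omega
    have hcond : (PySem.Set.len (PySem.Set.ofList ((p ++ [c]).drop (p.length - 3))) = 4) ↔
        ((p.length : Int) - (sN' : Int) + 1 = 4) := by
      rw [setLen_four hWlen]
      constructor
      · intro hWnd
        have h1 : sN' ≤ p.length - 3 := by
          by_contra hgt
          exact hmin' (p.length - 3) (by omega) hWnd
        have h2 : sN' = p.length - 3 := by omega
        omega
      · intro h
        have : sN' = p.length - 3 := by omega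
        exact this ▸ hnd'
    rw [if_pos (by exact_mod_cast hn3), hchars]
    by_cases hset : PySem.Set.len (PySem.Set.ofList ((p ++ [c]).drop (p.length - 3))) = 4
    · rw [if_pos hset, if_pos (hcond.mp hset)]
    · rw [if_neg hset, if_neg (fun h => hset (hcond.mpr h))]
      rw [List.tail_drop]
      have : p.length - 3 + 1 = p.length + 1 - 3 := by omega
      rw [this]
      have hne : ¬ ((p.length : Int) - (sN' : Int) + 1 = 4) := fun h => hset (hcond.mpr h)
      exact hrec (by omega)
  · rw [if_neg (by exact_mod_cast hn3), hchars]
    rw [if_neg (by omega)]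
    have : p.length - 3 = p.length + 1 - 3 := by omega
    rw [this]
    exact hrec (by omega)

lemma go_eq (rest : List Char) : ∀ (p : List Char) (sN : Nat) (seen : PySem.Dict Char Int),
    sN ≤ p.length →
    (p.drop sN).Nodup →
    (∀ s, s < sN → ¬ (p.drop s).Nodup) →
    p.length - sN ≤ 3 →
    (∀ c, seen.get? c = (lastIdx? p c).map (fun j => (j : Int))) →
    part1Go rest (p.length : Int) (p.drop (p.length - 3)) =
      part1AltGo rest (p.length : Int) (sN : Int) seen := by
  induction rest with
  | nil => intro p sN seen _ _ _ _ _; simp [part1Go, part1AltGo]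
  | cons c rest ih =>
    intro p sN seen hsle hnd hmin hwin hseen
    have hseen' : ∀ c', (seen.insert c (p.length : Int)).get? c' =
        (lastIdx? (p ++ [c]) c').map (fun j => (j : Int)) := by
      intro c'
      rw [PySem.Dict.get?_insert, lastIdx?_append]
      by_cases hcc : c' = c
      · simp [hcc]
      · have h2 : ¬ c = c' := fun h => hcc h.symm
        simp [hcc, h2, hseen c']
    simp only [part1Go, part1AltGo]
    have hcon : seen.contains c = (seen.get? c).isSome := PySem.Dict.contains_eq_isSome_get? _ _
    cases hj : lastIdx? p c with
    | none =>
      have hc : c ∉ p := lastIdx?_none.mp hj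
      have hsc : seen.get? c = none := by rw [hseen c, hj]; rfl
      have hb : (seen.contains c && decide (seen.getD c 0 ≥ (sN : Int))) = false := by
        rw [hcon, hsc]; rfl
      rw [if_neg (show ¬ ((seen.contains c && decide (seen.getD c 0 ≥ (sN : Int))) = true)
        from by simp [hb])]
      exact go_step rest p c sN sN seen (le_refl _) (by omega) hwin
        (nodup_drop_append hsle hnd (fun hm => hc ((List.drop_subset _ _) hm)))
        (fun s hs => not_nodup_drop_append (by omega) (Or.inl (hmin s hs)))
        ih hseen'
    | some j =>
      obtain ⟨hjlt, hjmem, hjnot⟩ := lastIdx?_some hj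
      have hsc : seen.get? c = some (j : Int) := by rw [hseen c, hj]; rfl
      have hgd : seen.getD c 0 = (j : Int) := by
        rw [PySem.Dict.getD_eq_get?_getD, hsc]; rfl
      by_cases hcase : sN ≤ j
      · have hb : (seen.contains c && decide (seen.getD c 0 ≥ (sN : Int))) = true := by
          rw [hcon, hsc, hgd]
          simp only [Option.isSome_some, Bool.true_and, decide_eq_true_eq, ge_iff_le]
          exact_mod_cast hcase
        rw [if_pos hb, hgd]
        have hc1 : (j : Int) + 1 = ((j + 1 : Nat) : Int) := by push_cast; ring
        rw [hc1]
        exact go_step rest p c sN (j + 1) seen (by omega) (by omega) hwin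
          (nodup_drop_append (by omega) (nodup_drop_mono (by omega) hnd) hjnot)
          (fun s hs => not_nodup_drop_append (by omega)
            (Or.inr (drop_le_mem (by omega) hjmem)))
          ih hseen'
      · have hb : (seen.contains c && decide (seen.getD c 0 ≥ (sN : Int))) = false := by
          rw [hcon, hsc, hgd]
          simp only [Option.isSome_some, Bool.true_and, decide_eq_false_iff_not, ge_iff_le,
            not_le]
          omega
        rw [if_neg (show ¬ ((seen.contains c && decide (seen.getD c 0 ≥ (sN : Int))) = true)
          from by simp [hb])]
        exact go_step rest p c sN sN seen (le_refl _) (by omega) hwin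
          (nodup_drop_append hsle hnd
            (fun hm => hjnot (drop_le_mem (by omega) hm)))
          (fun s hs => not_nodup_drop_append (by omega) (Or.inl (hmin s hs)))
          ih hseen'

-- ===== VERDICT (by name: the statement is the Claim_ definition above) =====
theorem part1_spec : Claim_equal_part1 := by
  intro data _
  unfold Spec_part1 part1 part1_alt
  have h := go_eq data.toList [] 0 PySem.Dict.empty (by simp) (by simp) (by omega) (by simp)
    (fun c => by simp [lastIdx?, PySem.Dict.get?_empty])
  simpa using h
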